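-- pv_equiv track=rewrite | github.com/DanielPerezMorales13/Retos-de-programacion | Algoritmos_de_programacion_2024/Python/algoritmo#5/src/ejercicio.py | vericarString
-- ===== SOURCE A (Python) =====
-- def vericarString(palabra: str) -> dict[str, bool]:
--     resultado: dict[str, bool] = dict()
--     lista: list[str] = list(palabra)
--     listaCaracteresRepetido: list[str] = list()
--     contador: int = 0
--     if palabra == palabra[::-1]:
--         resultado["Palíndromos"] = True
--     else:
--         resultado["Palíndromos"] = False
--
--     for caracter in lista:
--         if caracter in palabra:
--             contador += 1
--         else:
--             pass
--     else:
--         if len(palabra) == contador: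
--             resultado["Anagramas"] = True
--         else:
--             resultado["Anagramas"] = False
--         contador: int = 0
--     for caracter in lista:
--         if caracter in palabra:
--             if caracter in listaCaracteresRepetido:
--                 resultado["Isogramas"] = False
--                 break
--             else:
--                 listaCaracteresRepetido.append(caracter)
--                 resultado["Isogramas"] = True
--
--     return resultado
-- ===== SOURCE B (Python) =====
-- def vericarString(palabra: str) -> dict[str, bool]:
--     resultado: dict[str, bool] = {
--         "Pal\u00edndromos": palabra == palabra[::-1],
--         "Anagramas": True,
--     }
--     if palabra:
--         resultado["Isogramas"] = len(set(palabra)) == len(palabra)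
--     return resultado
-- ===== Notes on version B (the rewrite author's own statement) =====
-- stated objective: simpler
-- what changed: Replaces A's two character-scanning loops (a counting loop whose count always equals len(palabra), and a duplicate-hunting loop with a membership list and break) with direct expressions: Anagramas is the constant True and Isogramas is len(set(palabra)) == len(palabra), inserted only for nonempty input exactly as A omits the key on the empty string.
import Mathlib
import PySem

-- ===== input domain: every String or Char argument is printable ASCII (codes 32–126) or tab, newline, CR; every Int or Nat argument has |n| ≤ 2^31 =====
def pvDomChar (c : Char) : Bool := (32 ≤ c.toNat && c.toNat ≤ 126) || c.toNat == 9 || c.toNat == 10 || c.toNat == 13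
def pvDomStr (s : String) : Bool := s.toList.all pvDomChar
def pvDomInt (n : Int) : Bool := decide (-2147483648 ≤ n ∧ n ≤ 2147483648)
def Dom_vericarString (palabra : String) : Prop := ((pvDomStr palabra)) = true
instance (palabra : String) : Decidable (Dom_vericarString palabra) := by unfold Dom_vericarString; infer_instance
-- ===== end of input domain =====

-- B replaces A's two character-scanning loops by direct expressions (Anagramas is constantly
-- true; Isogramas is a set-size comparison, inserted only for nonempty input): simpler.


-- ===== PORT A =====
-- the second 'for caracter in lista' loop of A, with its break
def vericarIsoLoop (palabra : String) : List Char → List Char → PySem.Dict String Bool → PySem.Dict String Bool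
  | [], _, d => d
  | c :: rest, rep, d =>
    if palabra.toList.contains c then
      if rep.contains c then d.insert "Isogramas" false   -- break
      else vericarIsoLoop palabra rest (rep ++ [c]) (d.insert "Isogramas" true)
    else vericarIsoLoop palabra rest rep d

def vericarString (palabra : String) : List (String × Bool) :=
  let resultado : PySem.Dict String Bool := PySem.Dict.empty
  let lista : List Char := palabra.toList
  let listaCaracteresRepetido : List Char := []
  let contador : Int := 0
  let resultado :=
    if some palabra = PySem.Str.slice? palabra none none (-1) then
      resultado.insert "Palíndromos" true
    else
      resultado.insert "Palíndromos" false
  let contador := lista.foldl (fun acc c => if palabra.toList.contains c then acc + 1 else acc) contador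
  let resultado :=
    if PySem.Str.len palabra = contador then resultado.insert "Anagramas" true
    else resultado.insert "Anagramas" false
  let resultado := vericarIsoLoop palabra lista listaCaracteresRepetido resultado
  resultado.items

-- ===== PORT B =====
def vericarString_alt (palabra : String) : List (String × Bool) :=
  let resultado : PySem.Dict String Bool :=
    (PySem.Dict.empty.insert "Palíndromos" (some palabra == PySem.Str.slice? palabra none none (-1))).insert
      "Anagramas" true
  let resultado :=
    if palabra ≠ "" then
      resultado.insert "Isogramas" ((PySem.Set.ofList palabra.toList).length == palabra.toList.length)
    else resultado
  resultado.items

-- ===== PRECONDITION & SPEC =====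
def Spec_vericarString (palabra : String) (out : List (String × Bool)) : Prop := out = vericarString_alt palabra
instance (palabra : String) (out : List (String × Bool)) : Decidable (Spec_vericarString palabra out) := by unfold Spec_vericarString; infer_instance

-- ===== CLAIM (what is proved, stated in full; the proofs are below) =====
def Claim_equal_vericarString : Prop := ∀ (palabra : String), Dom_vericarString palabra → Spec_vericarString palabra (vericarString palabra)

-- ===== LEMMAS AND PROOFS =====

-- the counting loop of A counts every character (each is a member of the word)
theorem vericar_count (l : List Char) (l' : List Char) (h : ∀ c ∈ l', l.contains c = true)
    (i : Int) :
    l'.foldl (fun acc c => if l.contains c then acc + 1 else acc) i = i + l'.length := by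
  induction l' generalizing i with
  | nil => simp
  | cons c rest ih =>
      have hc := h c (by simp)
      simp only [List.foldl_cons, hc, if_pos]
      rw [ih (fun x hx => h x (by simp [hx]))]
      simp only [List.length_cons]; push_cast; omega

-- characterisation of A's duplicate-hunting loop
theorem vericarIsoLoop_eq (palabra : String) (rest rep : List Char)
    (d : PySem.Dict String Bool) (hnd : rep.Nodup)
    (hmem : ∀ c ∈ rest, palabra.toList.contains c = true) :
    vericarIsoLoop palabra rest rep d =
      if rest = [] then d else d.insert "Isogramas" (decide (rep ++ rest).Nodup) := by
  induction rest generalizing rep d with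
  | nil => simp [vericarIsoLoop]
  | cons c rest ih =>
      have hc := hmem c (by simp)
      simp only [vericarIsoLoop, hc, if_pos]
      by_cases hrep : c ∈ rep
      · rw [if_pos (by simp [hrep])]
        have : ¬ (rep ++ c :: rest).Nodup := by
          intro h
          exact (List.disjoint_of_nodup_append h) hrep (by simp)
        simp [this]
      · rw [if_neg (by simp [hrep])]
        have hnd' : (rep ++ [c]).Nodup := by
          refine List.Nodup.append hnd (List.nodup_singleton c) ?_
          intro a ha hb
          exact hrep ((List.mem_singleton.mp hb) ▸ ha)
        rw [ih (rep ++ [c]) (d.insert "Isogramas" true) hnd'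
              (fun x hx => hmem x (by simp [hx]))]
        by_cases hrest : rest = []
        · subst hrest
          simp [hnd']
        · rw [if_neg hrest, if_neg (by simp), PySem.Dict.insert_insert_self,
            List.append_assoc, List.singleton_append]

-- len(set(l)) == len(l) is exactly the Nodup test
theorem setlen_eq_nodup (l : List Char) :
    ((PySem.Set.ofList l).length == l.length) = decide l.Nodup := by
  have hperm : (PySem.Set.ofList l).Perm l.dedup := by
    refine (List.perm_ext_iff_of_nodup (PySem.Set.nodup_ofList l) l.nodup_dedup).mpr ?_
    intro x; simp [PySem.Set.mem_ofList, List.mem_dedup]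
  have hlen : (PySem.Set.ofList l).length = l.dedup.length := hperm.length_eq
  by_cases h : l.Nodup
  · simp [hlen, List.Nodup.dedup h, h]
  · have hsub : l.dedup.Sublist l := l.dedup_sublist
    have : l.dedup.length ≠ l.length := by
      intro he
      exact h (by rw [← List.dedup_eq_self]; exact hsub.eq_of_length he)
    simp [hlen, h, this]

theorem vericar_main (palabra : String) : vericarString palabra = vericarString_alt palabra := by
  unfold vericarString vericarString_alt
  simp only []
  -- palindrome insert
  have hpal : (if some palabra = PySem.Str.slice? palabra none none (-1) then
      (PySem.Dict.empty : PySem.Dict String Bool).insert "Palíndromos" true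
    else PySem.Dict.empty.insert "Palíndromos" false) =
      PySem.Dict.empty.insert "Palíndromos"
        (some palabra == PySem.Str.slice? palabra none none (-1)) := by
    by_cases h : some palabra = PySem.Str.slice? palabra none none (-1)
    · simp [h]
    · rw [if_neg h,
        show (some palabra == PySem.Str.slice? palabra none none (-1)) = false from
          beq_eq_false_iff_ne.mpr h]
  rw [hpal]
  -- anagram insert: count = length, so the condition holds
  rw [vericar_count palabra.toList palabra.toList (fun c hc => by simp [hc]) 0]
  have hlen : PySem.Str.len palabra = (0 : Int) + palabra.toList.length := by
    simp [PySem.Str.len]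
  rw [if_pos hlen]
  -- isogram loop
  rw [vericarIsoLoop_eq palabra palabra.toList [] _ List.nodup_nil
        (fun c hc => by simp [hc])]
  by_cases hnil : palabra.toList = []
  · have hemp : palabra = "" := by
      have := congrArg String.ofList hnil
      simpa using this
    simp [hemp]
  · have hne : palabra ≠ "" := by
      intro h; exact hnil (by simp [h])
    rw [if_neg hnil, if_pos hne, List.nil_append, setlen_eq_nodup]

-- ===== VERDICT (by name: the statement is the Claim_ definition above) =====
theorem vericarString_spec : Claim_equal_vericarString := by
  intro palabra _
  unfold Spec_vericarString
  exact vericar_main palabra
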